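-- pv_equiv track=rewrite | github.com/creschendo/neetcode-submissions-bw40dgz9 | Data Structures & Algorithms/non-cyclical-number/submission-1.py | helper
-- ===== SOURCE A (Python) =====
-- def helper(n):
--     output = 0
--     while n:
--         digit = n % 10
--         digit = digit ** 2
--         output += digit
--         n = n // 10
--     return output
-- ===== SOURCE B (Python) =====
-- def helper(n):
--     return sum(int(ch) ** 2 for ch in str(n))
-- ===== Notes on version B (the rewrite author's own statement) =====
-- stated objective: idiomatic
-- what changed: B sums the squares of the decimal-string digits of n in one expression instead of A's arithmetic while-loop with % 10 and // 10.
import Mathlib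
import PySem

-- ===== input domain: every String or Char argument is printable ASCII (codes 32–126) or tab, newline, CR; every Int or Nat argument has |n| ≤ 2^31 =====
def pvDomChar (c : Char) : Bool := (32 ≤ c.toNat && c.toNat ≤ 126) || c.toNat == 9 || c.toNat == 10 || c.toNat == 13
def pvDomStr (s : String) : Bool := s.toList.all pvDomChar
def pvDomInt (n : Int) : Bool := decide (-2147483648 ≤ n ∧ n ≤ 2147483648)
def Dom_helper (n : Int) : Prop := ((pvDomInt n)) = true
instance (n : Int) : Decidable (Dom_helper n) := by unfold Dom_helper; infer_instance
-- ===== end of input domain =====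

-- B computes the same digit-square sum from str(n) in one expression instead of A's %/// loop (idiomatic).

-- ===== PORT A =====
-- the while-loop of A; the `n ≤ 0` guard makes it total (Python exits only on n = 0;
-- for n < 0 it loops forever, excluded by Pre_helper)
def helperLoop (n output : Int) : Int :=
  if h : n ≤ 0 then output
  else
    helperLoop (PySem.Int.floordiv n 10) (output + (PySem.Int.mod n 10) ^ 2)
termination_by n.toNat
decreasing_by
  have : Int.fdiv n 10 = n / 10 := by
    rw [Int.fdiv_eq_ediv]; norm_num
  simp only [PySem.Int.floordiv, this]
  omega

def helper (n : Int) : Int := helperLoop n 0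

-- ===== PORT B =====
-- int(ch) in Source B: exact on the digit characters produced by str(n) for n ≥ 0
-- (for n < 0 Python's int('-') raises ValueError; those inputs are outside Pre_helper)
def digitVal (c : Char) : Int := (c.toNat : Int) - 48

def helper_alt (n : Int) : Int :=
  (PySem.Int.toStr n).toList.foldl (fun acc c => acc + (digitVal c) ^ 2) 0

-- ===== PRECONDITION & SPEC =====
-- Pre_ excludes negative n, on which A's while-loop never terminates (floor division keeps n at minus one) and B raises ValueError.
def Pre_helper (n : Int) : Prop := 0 ≤ n
instance (n : Int) : Decidable (Pre_helper n) := by unfold Pre_helper; infer_instance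
def pvWitness_helper : Int := (123)
def Spec_helper (n : Int) (out : Int) : Prop := out = helper_alt n
instance (n : Int) (out : Int) : Decidable (Spec_helper n out) := by unfold Spec_helper; infer_instance

-- ===== CLAIM (what is proved, stated in full; the proofs are below) =====
def Claim_equal_helper : Prop := ∀ (n : Int), Dom_helper n → Pre_helper n → Spec_helper n (helper n)

-- ===== LEMMAS AND PROOFS =====

-- reference function: digit-square sum of a natural number
def sqsum (m : Nat) : Int :=
  if m = 0 then 0 else ((m % 10 : Nat) : Int) ^ 2 + sqsum (m / 10)
termination_by m
decreasing_by omega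

lemma helperLoop_eq (m : Nat) : ∀ out : Int, helperLoop (m : Int) out = out + sqsum m := by
  induction m using Nat.strong_induction_on with
  | _ m ih =>
    intro out
    by_cases h : m = 0
    · subst h; rw [helperLoop.eq_def, sqsum]; simp
    · rw [helperLoop.eq_def, sqsum]
      have hfd : PySem.Int.floordiv (m : Int) 10 = ((m / 10 : Nat) : Int) := by
        simp [PySem.Int.floordiv, Int.fdiv_eq_ediv]
      have hmod : PySem.Int.mod (m : Int) 10 = ((m % 10 : Nat) : Int) := by
        simp [PySem.Int.mod, Int.fmod_eq_emod]
      rw [dif_neg (by omega), hfd, hmod, ih (m / 10) (by omega)]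
      simp [h]
      ring

lemma digitVal_digitChar (d : Nat) (hd : d < 10) : digitVal (Nat.digitChar d) = (d : Int) := by
  interval_cases d <;> decide

-- foldl over the digit characters produced by Nat.toDigitsCore accumulates sqsum
lemma foldl_toDigitsCore (fuel : Nat) : ∀ (m : Nat), m < fuel → ∀ (ds : List Char) (acc : Int),
    (Nat.toDigitsCore 10 fuel m ds).foldl (fun acc c => acc + (digitVal c) ^ 2) acc
      = (ds.foldl (fun acc c => acc + (digitVal c) ^ 2) (acc + sqsum m)) := by
  induction fuel with
  | zero => intro m hm; omega
  | succ fuel ih =>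
    intro m hm ds acc
    rw [Nat.toDigitsCore]
    by_cases h : m / 10 = 0
    · rw [if_pos h]
      simp only [List.foldl]
      congr 1
      by_cases h0 : m = 0
      · subst h0; rw [sqsum]; norm_num
        rw [digitVal_digitChar 0 (by omega)]
        simp
      · rw [sqsum, if_neg h0, sqsum, if_pos h]
        rw [digitVal_digitChar _ (Nat.mod_lt _ (by omega))]
        ring
    · rw [if_neg h]
      have hlt : m / 10 < fuel := by omega
      rw [ih _ hlt]
      simp only [List.foldl]
      congr 1
      rw [digitVal_digitChar _ (Nat.mod_lt _ (by omega))]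
      conv_rhs => rw [sqsum, if_neg (by omega : ¬ m = 0)]
      ring

lemma helper_alt_eq (m : Nat) : helper_alt (m : Int) = sqsum m := by
  unfold helper_alt
  rw [PySem.Int.toStr]
  have : (String.ofList (PySem.Int.toChars (m : Int))).toList = PySem.Int.toChars (m : Int) := by
    simp
  rw [this]
  have hch : PySem.Int.toChars (m : Int) = Nat.toDigits 10 m := by
    simp [PySem.Int.toChars]
  rw [hch, Nat.toDigits, foldl_toDigitsCore (m + 1) m (by omega) [] 0]
  simp

-- ===== VERDICT (by name: the statement is the Claim_ definition above) =====
theorem helper_spec : Claim_equal_helper := by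
  intro n _ hpre
  unfold Spec_helper helper
  obtain ⟨m, rfl⟩ := Int.eq_ofNat_of_zero_le hpre
  rw [helperLoop_eq m 0, helper_alt_eq]
  simp
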